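-- pv_equiv track=rewrite | github.com/odettemoreno/An-Algebraic-Approach-to-the-Solutions-of-the-Open-Shop-Scheduling-Problem-with-Applications | functions_BDA.py | sucessor_sequence
-- ===== SOURCE A (Python) =====
-- def sucessor_sequence(polygons,Vertices):
--     Sucessor_sequence=[]
--     vertex=0
--     for vertice in Vertices:
--         Sucessor_sequence.append([])
--         for i in range(len(polygons)):
--             for j in range(len(polygons[i])):
--                 if int(vertice)==int(polygons[i][j]):
--                     Sucessor_sequence[vertex].append(i+1)
--         vertex=vertex+1
--
--
--     for i in range(len(Sucessor_sequence)):
--       Sucessor_sequence[i].append(Sucessor_sequence[i][0])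
--
--
--
--     return Sucessor_sequence
-- ===== SOURCE B (Python) =====
-- def sucessor_sequence(polygons, Vertices):
--     # One pass over polygons building vertex -> ordered list of 1-based polygon
--     # indices (with multiplicity), then one lookup per vertex, cyclically closed.
--     occ = {}
--     for i, poly in enumerate(polygons):
--         for v in poly:
--             occ.setdefault(int(v), []).append(i + 1)
--     return [occ[int(v)] + [occ[int(v)][0]] for v in Vertices]
-- ===== Notes on version B (the rewrite author's own statement) =====
-- stated objective: faster
-- what changed: Instead of scanning every polygon entry once per vertex, B builds a dictionary vertex->ordered index list in a single pass over the polygons and then answers each vertex by one lookup.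
import Mathlib
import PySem

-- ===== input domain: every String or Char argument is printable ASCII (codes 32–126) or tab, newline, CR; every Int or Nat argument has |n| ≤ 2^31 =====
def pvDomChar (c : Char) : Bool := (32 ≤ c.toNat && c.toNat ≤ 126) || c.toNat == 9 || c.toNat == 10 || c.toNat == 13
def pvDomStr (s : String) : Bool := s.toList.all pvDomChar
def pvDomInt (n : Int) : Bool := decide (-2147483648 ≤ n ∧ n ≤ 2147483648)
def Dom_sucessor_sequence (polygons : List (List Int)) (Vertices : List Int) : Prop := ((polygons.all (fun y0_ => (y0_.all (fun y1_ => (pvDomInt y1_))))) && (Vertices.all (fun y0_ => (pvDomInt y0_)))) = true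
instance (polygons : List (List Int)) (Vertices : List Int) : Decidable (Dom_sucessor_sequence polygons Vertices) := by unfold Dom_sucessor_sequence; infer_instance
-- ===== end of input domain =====

-- B builds a dict vertex -> ordered index list in one pass over the polygons, then one
-- lookup per vertex (objective: faster, per-vertex rescans of all polygons disappear).

-- ===== PORT A =====
-- 'for j in range(len(polygons[i])): if int(vertice)==int(polygons[i][j]): append(i+1)'
-- ported as a fold over the polygon's elements (the loop only reads polygons[i][j]).
def aInner (v : Int) (poly : List Int) (i : Int) (row : List Int) : List Int :=
  poly.foldl (fun row x => if v == x then row ++ [i + 1] else row) row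

-- 'for i in range(len(polygons)):' as structural recursion carrying the index i.
def aRow (v : Int) : List (List Int) → Int → List Int → List Int
  | [], _, row => row
  | poly :: rest, i, row => aRow v rest (i + 1) (aInner v poly i row)

def sucessor_sequence (polygons : List (List Int)) (Vertices : List Int) : List (List Int) :=
  -- first loop: one row per vertex; second loop: append row[0] to each row
  -- (row[0] on an empty row is Python's IndexError — excluded by Pre_).
  (Vertices.map (fun v => aRow v polygons 0 [])).map
    (fun r => r ++ [PySem.List.pyGetD r 0 0])

-- ===== PORT B =====
-- occ.setdefault(v, []).append(i + 1) over enumerate(polygons)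
def bOcc (polygons : List (List Int)) : PySem.Dict Int (List Int) :=
  (PySem.List.enumerate polygons 0).foldl
    (fun d ip => ip.2.foldl (fun d x => d.modify x [] (· ++ [ip.1 + 1])) d)
    PySem.Dict.empty

def sucessor_sequence_alt (polygons : List (List Int)) (Vertices : List Int) : List (List Int) :=
  let occ := bOcc polygons
  Vertices.map (fun v => let l := occ.getD v []; l ++ [PySem.List.pyGetD l 0 0])

-- ===== PRECONDITION & SPEC =====
-- A raises IndexError (row[0] on an empty row) exactly when some vertex occurs in no
-- polygon; B raises KeyError there. Pre_ excludes exactly those inputs.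
def Pre_sucessor_sequence (polygons : List (List Int)) (Vertices : List Int) : Prop :=
  ∀ v ∈ Vertices, ∃ poly ∈ polygons, v ∈ poly
instance (polygons : List (List Int)) (Vertices : List Int) : Decidable (Pre_sucessor_sequence polygons Vertices) := by unfold Pre_sucessor_sequence; infer_instance

def pvWitness_sucessor_sequence : List (List Int) × List Int := ([[1, 2], [2, 3]], [2, 1, 3])

def Spec_sucessor_sequence (polygons : List (List Int)) (Vertices : List Int) (out : List (List Int)) : Prop := out = sucessor_sequence_alt polygons Vertices
instance (polygons : List (List Int)) (Vertices : List Int) (out : List (List Int)) : Decidable (Spec_sucessor_sequence polygons Vertices out) := by unfold Spec_sucessor_sequence; infer_instance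

-- ===== CLAIM (what is proved, stated in full; the proofs are below) =====
def Claim_equal_sucessor_sequence : Prop := ∀ (polygons : List (List Int)) (Vertices : List Int), Dom_sucessor_sequence polygons Vertices → Pre_sucessor_sequence polygons Vertices → Spec_sucessor_sequence polygons Vertices (sucessor_sequence polygons Vertices)

-- ===== LEMMAS AND PROOFS =====

-- A's inner loop is row ++ the matches of poly mapped to the constant i+1.
theorem aInner_eq (v : Int) (poly : List Int) (i : Int) (row : List Int) :
    aInner v poly i row = row ++ (poly.filter (fun x => x == v)).map (fun _ => i + 1) := by
  unfold aInner
  rw [PySem.List.foldl_append_if]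
  have : List.filter (fun x => v == x) poly = List.filter (fun x => x == v) poly :=
    List.filter_congr (fun x _ => by simp [eq_comm])
  rw [← this]

-- B's inner dict loop, observed at key v.
theorem bInner_getD (v : Int) (poly : List Int) (c : Int) (d : PySem.Dict Int (List Int)) :
    (poly.foldl (fun d x => d.modify x [] (· ++ [c])) d).getD v []
      = d.getD v [] ++ (poly.filter (fun x => x == v)).map (fun _ => c) := by
  have h : poly.foldl (fun d x => d.modify x [] (· ++ [c])) d
      = (poly.map (fun x => (x, c))).foldl (fun d p => d.modify p.1 [] (· ++ [p.2])) d := by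
    rw [List.foldl_map]
  rw [h, PySem.Dict.getD_foldl_modify_append]
  congr 1
  rw [List.filter_map, List.map_map]
  rfl

-- Building the dict over the remaining polygons equals continuing A's row scan.
theorem occ_getD (polys : List (List Int)) (s : Int) (d : PySem.Dict Int (List Int)) (v : Int) :
    ((PySem.List.enumerate polys s).foldl
        (fun d ip => ip.2.foldl (fun d x => d.modify x [] (· ++ [ip.1 + 1])) d) d).getD v []
      = aRow v polys s (d.getD v []) := by
  induction polys generalizing s d with
  | nil => simp [PySem.List.enumerate_nil, aRow]
  | cons poly rest ih =>
      rw [PySem.List.enumerate_cons]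
      simp only [List.foldl_cons]
      rw [ih, aRow, aInner_eq, bInner_getD]

-- ===== VERDICT (by name: the statement is the Claim_ definition above) =====
theorem sucessor_sequence_spec : Claim_equal_sucessor_sequence := by
  intro polygons Vertices _ _
  unfold Spec_sucessor_sequence sucessor_sequence sucessor_sequence_alt
  rw [List.map_map]
  apply List.map_congr_left
  intro v _
  have h := occ_getD polygons 0 PySem.Dict.empty v
  rw [PySem.Dict.getD_empty] at h
  simp only [bOcc, h, Function.comp_apply]
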